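-- pv_equiv track=rewrite | github.com/jhhom/fjsp-gnnrl | evaluations/standard/boxplot/fjsp/get_job_info_from_op_id.py | get_job_info_from_op_id
-- ===== SOURCE A (Python) =====
-- def get_job_info_from_op_id(op_id: int, last_op_id_of_jobs) -> 'tuple[int, int]':
--     for i in range(len(last_op_id_of_jobs)):
--         if last_op_id_of_jobs[i] >= op_id:
--             if i == 0:
--                 action_job = 0
--                 action_op = op_id
--                 break
--             else:
--                 action_job = i
--                 action_op = op_id - (last_op_id_of_jobs[i - 1] + 1)
--                 break
--     return (action_job, int(action_op))
-- ===== SOURCE B (Python) =====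
-- def get_job_info_from_op_id(op_id: int, last_op_id_of_jobs) -> 'tuple[int, int]':
--     # Divide and conquer: find the leftmost index with value >= op_id by
--     # splitting the index range in half and searching the right half only
--     # when the left half holds no match; then compute the offset once.
--     def first_ge(lo, hi):  # leftmost match in [lo, hi), or None
--         if hi - lo == 1:
--             return lo if last_op_id_of_jobs[lo] >= op_id else None
--         mid = (lo + hi) // 2
--         r = first_ge(lo, mid)
--         if r is None:
--             r = first_ge(mid, hi)
--         return r
--
--     j = first_ge(0, len(last_op_id_of_jobs))
--     base = 0 if j == 0 else last_op_id_of_jobs[j - 1] + 1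
--     return (j, op_id - base)
-- ===== Notes on version B (the rewrite author's own statement) =====
-- stated objective: alternative
-- what changed: Replaces A's linear indexed scan with early break by a divide-and-conquer tree recursion that locates the leftmost index satisfying value >= op_id via binary splitting (searching the right half only when the left half has no match), then derives the offset from that index in one step.
import Mathlib
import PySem

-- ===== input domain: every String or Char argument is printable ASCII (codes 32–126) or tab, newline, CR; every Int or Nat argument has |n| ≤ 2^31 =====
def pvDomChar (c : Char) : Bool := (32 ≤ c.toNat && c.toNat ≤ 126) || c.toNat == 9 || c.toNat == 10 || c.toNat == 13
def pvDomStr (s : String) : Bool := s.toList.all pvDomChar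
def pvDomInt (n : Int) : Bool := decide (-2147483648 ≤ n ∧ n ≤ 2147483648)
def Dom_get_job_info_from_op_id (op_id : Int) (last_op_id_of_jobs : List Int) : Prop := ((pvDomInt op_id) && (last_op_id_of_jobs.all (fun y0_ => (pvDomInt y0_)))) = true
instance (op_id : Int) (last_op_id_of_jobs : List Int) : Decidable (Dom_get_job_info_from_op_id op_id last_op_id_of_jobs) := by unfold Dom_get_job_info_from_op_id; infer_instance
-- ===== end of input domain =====

-- B replaces A's linear indexed scan by a divide-and-conquer recursion that finds the leftmost
-- index with value >= op_id by binary splitting, then computes the offset once (alternative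
-- decomposition, same cost).

-- ===== PORT A =====
-- A's for-loop over range(len(..)): the first i with xs[i] >= op_id breaks with the pair;
-- if the loop ends without a break, Python raises UnboundLocalError (none here, excluded by Pre_).
def pvALoop (op_id : Int) (xs : List Int) (i : Nat) : Option (Int × Int) :=
  if i < xs.length then
    if op_id ≤ xs.getD i 0 then            -- xs[i] and xs[i - 1] are in range here, so getD is exact
      if i = 0 then some (0, op_id)
      else some ((i : Int), op_id - (xs.getD (i - 1) 0 + 1))
    else pvALoop op_id xs (i + 1)
  else none
termination_by xs.length - i
decreasing_by omega

def get_job_info_from_op_id (op_id : Int) (last_op_id_of_jobs : List Int) : Int × Int :=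
  (pvALoop op_id last_op_id_of_jobs 0).getD (0, 0)

-- ===== PORT B =====
-- Source B's first_ge(lo, hi): leftmost index in [lo, hi) with xs[index] >= op_id, none otherwise;
-- searches the left half first and the right half only when the left returns None.
def pvFirstGE (op_id : Int) (xs : List Int) (lo hi : Nat) : Option Nat :=
  if _h : lo < hi then
    if hi - lo = 1 then (if op_id ≤ xs.getD lo 0 then some lo else none)
    else
      match pvFirstGE op_id xs lo ((lo + hi) / 2) with
      | some r => some r
      | none => pvFirstGE op_id xs ((lo + hi) / 2) hi
  else none
termination_by hi - lo
decreasing_by all_goals omega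

def get_job_info_from_op_id_alt (op_id : Int) (last_op_id_of_jobs : List Int) : Int × Int :=
  match pvFirstGE op_id last_op_id_of_jobs 0 last_op_id_of_jobs.length with
  | some j =>
      -- Source B: base = 0 if j == 0 else xs[j - 1] + 1; j >= 1 puts j - 1 in range, so getD is exact
      ((j : Int), op_id - (if j = 0 then 0 else last_op_id_of_jobs.getD (j - 1) 0 + 1))
  | none => (0, 0)  -- unreachable under Pre_ (Python B raises there, as A does)

-- ===== PRECONDITION & SPEC =====
-- Pre_ is exactly A's return domain: some element is >= op_id (otherwise A's loop never breaks
-- and A raises UnboundLocalError on the unbound locals).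
def Pre_get_job_info_from_op_id (op_id : Int) (last_op_id_of_jobs : List Int) : Prop :=
  ∃ x ∈ last_op_id_of_jobs, op_id ≤ x
instance (op_id : Int) (last_op_id_of_jobs : List Int) : Decidable (Pre_get_job_info_from_op_id op_id last_op_id_of_jobs) := by unfold Pre_get_job_info_from_op_id; infer_instance

def pvWitness_get_job_info_from_op_id : Int × List Int := (3, [1, 4, 9])

def Spec_get_job_info_from_op_id (op_id : Int) (last_op_id_of_jobs : List Int) (out : Int × Int) : Prop := out = get_job_info_from_op_id_alt op_id last_op_id_of_jobs
instance (op_id : Int) (last_op_id_of_jobs : List Int) (out : Int × Int) : Decidable (Spec_get_job_info_from_op_id op_id last_op_id_of_jobs out) := by unfold Spec_get_job_info_from_op_id; infer_instance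

-- ===== CLAIM (what is proved, stated in full; the proofs are below) =====
def Claim_equal_get_job_info_from_op_id : Prop := ∀ (op_id : Int) (last_op_id_of_jobs : List Int), Dom_get_job_info_from_op_id op_id last_op_id_of_jobs → Pre_get_job_info_from_op_id op_id last_op_id_of_jobs → Spec_get_job_info_from_op_id op_id last_op_id_of_jobs (get_job_info_from_op_id op_id last_op_id_of_jobs)

-- ===== LEMMAS AND PROOFS =====

-- A's scan, started at i, jumps straight to the first matching index j
theorem pvALoop_eq (op_id : Int) (xs : List Int) :
    ∀ (n i j : Nat), j - i ≤ n → i ≤ j → j < xs.length →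
    (∀ k, i ≤ k → k < j → xs.getD k 0 < op_id) →
    op_id ≤ xs.getD j 0 →
    pvALoop op_id xs i = some (if j = 0 then (0, op_id)
      else ((j : Int), op_id - (xs.getD (j - 1) 0 + 1))) := by
  intro n
  induction n with
  | zero =>
    intro i j hn hij hj hmid hge
    have : i = j := by omega
    subst this
    rw [pvALoop]
    simp only [hj, if_true, hge, if_true]
    split <;> simp_all
  | succ n ih =>
    intro i j hn hij hj hmid hge
    rcases Nat.eq_or_lt_of_le hij with rfl | hlt
    · rw [pvALoop]
      simp only [hj, if_true, hge, if_true]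
      split <;> simp_all
    · rw [pvALoop]
      have hi : i < xs.length := by omega
      have hx : ¬ op_id ≤ xs.getD i 0 := by
        have := hmid i (le_refl _) hlt
        omega
      simp only [hi, if_true, hx, if_false]
      exact ih (i + 1) j (by omega) (by omega) hj
        (fun k hk hkj => hmid k (by omega) hkj) hge

-- B's divide-and-conquer search finds nothing on an interval with no match
theorem pvFirstGE_none (op_id : Int) (xs : List Int) :
    ∀ (n lo hi : Nat), hi - lo ≤ n →
    (∀ k, lo ≤ k → k < hi → ¬ op_id ≤ xs.getD k 0) →
    pvFirstGE op_id xs lo hi = none := by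
  intro n
  induction n with
  | zero =>
    intro lo hi hn _
    rw [pvFirstGE]
    rw [dif_neg (by omega : ¬ lo < hi)]
  | succ n ih =>
    intro lo hi hn hno
    rw [pvFirstGE]
    split
    · next hlt =>
      split
      · next h1 =>
        rw [if_neg (hno lo (le_refl _) (by omega))]
      · next h1 =>
        rw [ih lo ((lo + hi) / 2) (by omega)
          (fun k hk hk' => hno k hk (by omega))]
        exact ih ((lo + hi) / 2) hi (by omega)
          (fun k hk hk' => hno k (by omega) hk')
    · rfl

-- B's divide-and-conquer search finds exactly the leftmost matching index
theorem pvFirstGE_eq (op_id : Int) (xs : List Int) :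
    ∀ (n lo hi j : Nat), hi - lo ≤ n → lo ≤ j → j < hi →
    (∀ k, lo ≤ k → k < j → ¬ op_id ≤ xs.getD k 0) →
    op_id ≤ xs.getD j 0 →
    pvFirstGE op_id xs lo hi = some j := by
  intro n
  induction n with
  | zero => intro lo hi j hn hlo hhi _ _; omega
  | succ n ih =>
    intro lo hi j hn hlo hhi hmin hge
    rw [pvFirstGE]
    rw [dif_pos (by omega : lo < hi)]
    split
    · next h1 =>
      have : j = lo := by omega
      subst this
      rw [if_pos hge]
    · next h1 =>
      rcases Nat.lt_or_ge j ((lo + hi) / 2) with hj | hj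
      · rw [ih lo ((lo + hi) / 2) j (by omega) hlo hj hmin hge]
      · rw [pvFirstGE_none op_id xs ((lo + hi) / 2) lo ((lo + hi) / 2) (by omega)
          (fun k hk hk' => hmin k hk (by omega))]
        rw [ih ((lo + hi) / 2) hi j (by omega) hj hhi
          (fun k hk hk' => hmin k (by omega) hk') hge]

-- ===== VERDICT (by name: the statement is the Claim_ definition above) =====
theorem get_job_info_from_op_id_spec : Claim_equal_get_job_info_from_op_id := by
  intro op_id xs _ hpre
  unfold Spec_get_job_info_from_op_id
  simp only [get_job_info_from_op_id, get_job_info_from_op_id_alt]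
  obtain ⟨x, hx, hle⟩ := hpre
  obtain ⟨m, hm, rfl⟩ := List.mem_iff_getElem.mp hx
  have hP : ∃ i, i < xs.length ∧ op_id ≤ xs.getD i 0 :=
    ⟨m, hm, by rwa [List.getD_eq_getElem xs 0 hm]⟩
  have hj := Nat.find_spec hP
  have hmin : ∀ k, k < Nat.find hP → ¬ op_id ≤ xs.getD k 0 := fun k hk hmatch =>
    Nat.find_min hP hk ⟨by omega, hmatch⟩
  generalize hjj : Nat.find hP = j at hj hmin
  rw [pvALoop_eq op_id xs xs.length 0 j (by omega) (Nat.zero_le _) hj.1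
    (fun k _ hk => not_le.mp (hmin k hk)) hj.2]
  rw [pvFirstGE_eq op_id xs xs.length 0 xs.length j (by omega) (Nat.zero_le _)
    hj.1 (fun k _ hk => hmin k hk) hj.2]
  simp only [Option.getD_some]
  by_cases h0 : j = 0
  · subst h0; simp
  · rw [if_neg h0, if_neg h0]
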